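-- pv_equiv track=rewrite | github.com/Hal609/SongCreator | generateNotes.py | createNotesList
-- ===== SOURCE A (Python) =====
-- def createNotesList(key, scale):
--     notesList = []
--     lowKey = key - sum(scale)
--     for i in range(2):
--         for j in range(len(scale)):
--             notesList.append(lowKey)
--             lowKey += scale[j]
--     return notesList
-- ===== SOURCE B (Python) =====
-- def createNotesList(key, scale):
--     # Build the list back-to-front: start from the top note key + sum(scale)
--     # and walk the doubled scale in reverse, subtracting each step.
--     high = key + sum(scale)
--     out = []
--     for step in reversed(scale + scale):
--         high -= step
--         out.append(high)
--     out.reverse()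
--     return out
-- ===== Notes on version B (the rewrite author's own statement) =====
-- stated objective: alternative
-- what changed: Builds the notes back-to-front: starts from the top note key + sum(scale), walks the doubled scale in reverse subtracting each interval, then reverses the collected list, instead of A's two nested forward loops accumulating upward from key - sum(scale).
import Mathlib
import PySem

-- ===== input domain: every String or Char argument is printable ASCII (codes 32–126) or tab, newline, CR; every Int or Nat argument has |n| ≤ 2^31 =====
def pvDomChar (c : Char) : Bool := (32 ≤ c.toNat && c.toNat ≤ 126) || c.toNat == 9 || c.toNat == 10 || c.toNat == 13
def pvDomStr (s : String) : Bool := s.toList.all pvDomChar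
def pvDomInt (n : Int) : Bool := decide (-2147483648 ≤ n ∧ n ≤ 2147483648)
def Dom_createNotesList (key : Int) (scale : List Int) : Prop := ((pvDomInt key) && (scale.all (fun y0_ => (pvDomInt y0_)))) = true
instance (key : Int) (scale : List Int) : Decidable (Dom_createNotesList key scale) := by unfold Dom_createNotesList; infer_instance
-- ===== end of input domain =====

-- B builds the list back-to-front: it starts from the top note key + sum(scale), walks the
-- doubled scale in reverse subtracting each interval, then reverses; objective: alternative.

-- ===== PORT A =====
-- state: (notesList, lowKey); outer loop over range(2), inner over range(len(scale))
def createNotesList (key : Int) (scale : List Int) : List Int :=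
  (((PySem.List.pyRange 0 2 1).foldl (fun (st : List Int × Int) _i =>
      (PySem.List.pyRange 0 (scale.length) 1).foldl (fun (st : List Int × Int) j =>
        (st.1 ++ [st.2], st.2 + PySem.List.pyGetD scale j 0)) st)
    ([], key - scale.sum))).1

-- ===== PORT B =====
-- state: (out, high); loop over reversed(scale + scale) subtracting, then out.reverse()
def createNotesList_alt (key : Int) (scale : List Int) : List Int :=
  (((scale ++ scale).reverse.foldl (fun (st : List Int × Int) step =>
      (st.1 ++ [st.2 - step], st.2 - step)) ([], key + scale.sum))).1.reverse

-- ===== PRECONDITION & SPEC =====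
def Spec_createNotesList (key : Int) (scale : List Int) (out : List Int) : Prop := out = createNotesList_alt key scale
instance (key : Int) (scale : List Int) (out : List Int) : Decidable (Spec_createNotesList key scale out) := by unfold Spec_createNotesList; infer_instance

-- ===== CLAIM (what is proved, stated in full; the proofs are below) =====
def Claim_equal_createNotesList : Prop := ∀ (key : Int) (scale : List Int), Dom_createNotesList key scale → Spec_createNotesList key scale (createNotesList key scale)

-- ===== LEMMAS AND PROOFS =====

-- reference upward scan: S l low = [low, low+l₀, low+l₀+l₁, …] (length = length l)
def pvS : List Int → Int → List Int
  | [], _ => []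
  | x :: xs, low => low :: pvS xs (low + x)

-- reference downward scan: T l s = [s-l₀, s-l₀-l₁, …]
def pvT : List Int → Int → List Int
  | [], _ => []
  | x :: xs, s => (s - x) :: pvT xs (s - x)

theorem pvS_append (a b : List Int) (low : Int) :
    pvS (a ++ b) low = pvS a low ++ pvS b (low + a.sum) := by
  induction a generalizing low with
  | nil => simp [pvS]
  | cons x xs ih => simp [pvS, ih, add_assoc]

theorem pvT_append (a b : List Int) (s : Int) :
    pvT (a ++ b) s = pvT a s ++ pvT b (s - a.sum) := by
  induction a generalizing s with
  | nil => simp [pvT]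
  | cons x xs ih => simp [pvT, ih, sub_sub]

-- A's inner fold accumulates pvS and the running sum
theorem foldA_eq (l : List Int) (acc : List Int) (low : Int) :
    l.foldl (fun (st : List Int × Int) x => (st.1 ++ [st.2], st.2 + x)) (acc, low)
      = (acc ++ pvS l low, low + l.sum) := by
  induction l generalizing acc low with
  | nil => simp [pvS]
  | cons x xs ih => simp [pvS, ih, add_assoc]

-- B's fold accumulates pvT and the running difference
theorem foldB_eq (l : List Int) (acc : List Int) (s : Int) :
    l.foldl (fun (st : List Int × Int) step => (st.1 ++ [st.2 - step], st.2 - step)) (acc, s)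
      = (acc ++ pvT l s, s - l.sum) := by
  induction l generalizing acc s with
  | nil => simp [pvT]
  | cons x xs ih => simp [pvT, ih, sub_sub]

-- walking backwards from the top and reversing gives the upward scan
theorem pvT_reverse (l : List Int) (low : Int) :
    pvT l.reverse (low + l.sum) = (pvS l low).reverse := by
  induction l generalizing low with
  | nil => simp [pvT, pvS]
  | cons x xs ih =>
      simp only [List.reverse_cons, List.sum_cons]
      rw [pvT_append]
      have h2 : low + (x + xs.sum) = (low + x) + xs.sum := by ring
      rw [h2, ih]
      have h3 : (low + x) + xs.sum - xs.reverse.sum = low + x := by simp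
      rw [h3]
      simp [pvT, pvS]

theorem createNotesList_eq (key : Int) (scale : List Int) :
    createNotesList key scale = createNotesList_alt key scale := by
  unfold createNotesList createNotesList_alt
  have h2 : PySem.List.pyRange 0 2 1 = [0, 1] := by decide
  rw [h2]
  simp only [List.foldl_cons, List.foldl_nil]
  rw [PySem.List.foldl_pyRange_zero_pyGetD' scale 0
        (fun (st : List Int × Int) x => (st.1 ++ [st.2], st.2 + x)),
      foldA_eq,
      PySem.List.foldl_pyRange_zero_pyGetD' scale 0
        (fun (st : List Int × Int) x => (st.1 ++ [st.2], st.2 + x)),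
      foldA_eq, foldB_eq]
  have hsum : key + scale.sum = (key - scale.sum) + (scale ++ scale).sum := by
    rw [List.sum_append]; ring
  show pvS scale (key - scale.sum) ++ pvS scale ((key - scale.sum) + scale.sum)
      = (pvT (scale ++ scale).reverse (key + scale.sum)).reverse
  rw [hsum, pvT_reverse, List.reverse_reverse, pvS_append]

-- ===== VERDICT (by name: the statement is the Claim_ definition above) =====
theorem createNotesList_spec : Claim_equal_createNotesList := by
  intro key scale _
  exact createNotesList_eq key scale
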